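-- pv_equiv track=rewrite | github.com/hivdb/post-align | postalign/models/sequence.py | enumerate_seq_pos
-- ===== SOURCE A (Python) =====
-- GAP_CHARS = '.-'
--
-- def enumerate_seq_pos(seq_text):
--     offset = 1
--     seq_pos = []
--     for na in seq_text:
--         if na in GAP_CHARS:
--             seq_pos.append(-1)
--         else:
--             seq_pos.append(offset)
--             offset += 1
--     return seq_pos
-- ===== SOURCE B (Python) =====
-- GAP_CHARS = '.-'
--
-- def enumerate_seq_pos(seq_text):
--     # prefix-table decomposition: mask, cumulative non-gap counts, then map
--     nongap = [na not in GAP_CHARS for na in seq_text]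
--     counts = []
--     total = 0
--     for b in nongap:
--         total += b
--         counts.append(total)
--     return [c if b else -1 for b, c in zip(nongap, counts)]
-- ===== Notes on version B (the rewrite author's own statement) =====
-- stated objective: alternative
-- what changed: Replaces the single conditional-increment loop by a three-stage decomposition: a non-gap boolean mask, a cumulative prefix-count pass over the mask, and a final zip/map that emits the count or -1.
import Mathlib
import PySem

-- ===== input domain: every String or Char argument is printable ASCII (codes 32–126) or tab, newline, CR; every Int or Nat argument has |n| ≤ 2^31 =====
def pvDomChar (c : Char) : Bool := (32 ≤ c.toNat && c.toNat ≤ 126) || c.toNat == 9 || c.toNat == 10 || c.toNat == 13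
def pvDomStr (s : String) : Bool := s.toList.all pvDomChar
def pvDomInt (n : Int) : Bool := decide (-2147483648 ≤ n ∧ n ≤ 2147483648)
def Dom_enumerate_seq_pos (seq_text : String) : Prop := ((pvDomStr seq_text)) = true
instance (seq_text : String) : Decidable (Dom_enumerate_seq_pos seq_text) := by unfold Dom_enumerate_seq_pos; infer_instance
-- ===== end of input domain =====

-- B recomputes the same positions by a different decomposition: a non-gap mask, a cumulative prefix-count pass, then a zip/map (objective: alternative, same cost).


-- ===== PORT A =====
-- 'na in GAP_CHARS' with GAP_CHARS = ".-" is ported as the exact two-character membership test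
def gapChar (na : Char) : Bool := na = '.' || na = '-'

def enumerate_seq_pos (seq_text : String) : List Int :=
  (seq_text.toList.foldl
    (fun (st : Int × List Int) na =>
      if gapChar na then (st.1, st.2 ++ [(-1 : Int)])
      else (st.1 + 1, st.2 ++ [st.1]))
    (1, [])).2

-- ===== PORT B =====
def enumerate_seq_pos_alt (seq_text : String) : List Int :=
  let nongap : List Bool := seq_text.toList.map (fun na => !gapChar na)
  let counts : List Int :=
    (nongap.foldl
      (fun (st : Int × List Int) b =>
        (st.1 + (if b then 1 else 0), st.2 ++ [st.1 + (if b then 1 else 0)]))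
      (0, [])).2
  (nongap.zip counts).map (fun p => if p.1 then p.2 else (-1 : Int))

-- ===== PRECONDITION & SPEC =====
def Spec_enumerate_seq_pos (seq_text : String) (out : List Int) : Prop := out = enumerate_seq_pos_alt seq_text
instance (seq_text : String) (out : List Int) : Decidable (Spec_enumerate_seq_pos seq_text out) := by unfold Spec_enumerate_seq_pos; infer_instance

-- ===== CLAIM (what is proved, stated in full; the proofs are below) =====
def Claim_equal_enumerate_seq_pos : Prop := ∀ (seq_text : String), Dom_enumerate_seq_pos seq_text → Spec_enumerate_seq_pos seq_text (enumerate_seq_pos seq_text)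

-- ===== LEMMAS AND PROOFS =====

-- recursive characterisation of A's loop
def goA : List Char → Int → List Int
  | [], _ => []
  | c :: cs, off =>
    if gapChar c then (-1 : Int) :: goA cs off
    else off :: goA cs (off + 1)

-- recursive characterisation of B's prefix-count pass
def scanB : List Bool → Int → List Int
  | [], _ => []
  | b :: bs, t => (t + (if b then 1 else 0)) :: scanB bs (t + (if b then 1 else 0))

lemma foldA_gen (l : List Char) : ∀ (off : Int) (acc : List Int),
    (l.foldl (fun (st : Int × List Int) na =>
      if gapChar na then (st.1, st.2 ++ [(-1 : Int)])
      else (st.1 + 1, st.2 ++ [st.1])) (off, acc)).2 = acc ++ goA l off := by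
  induction l with
  | nil => intro off acc; simp [goA]
  | cons c cs ih =>
    intro off acc
    by_cases h : gapChar c <;> simp [goA, h, ih]

lemma foldB_gen (l : List Bool) : ∀ (t : Int) (acc : List Int),
    (l.foldl (fun (st : Int × List Int) b =>
      (st.1 + (if b then 1 else 0), st.2 ++ [st.1 + (if b then 1 else 0)])) (t, acc)).2
      = acc ++ scanB l t := by
  induction l with
  | nil => intro t acc; simp [scanB]
  | cons b bs ih =>
    intro t acc
    simp [scanB, ih]

lemma zip_scan_eq_goA (l : List Char) : ∀ (t : Int),
    ((l.map (fun na => !gapChar na)).zip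
      (scanB (l.map (fun na => !gapChar na)) t)).map
        (fun p => if p.1 then p.2 else (-1 : Int)) = goA l (t + 1) := by
  induction l with
  | nil => intro t; simp [scanB, goA]
  | cons c cs ih =>
    intro t
    by_cases h : gapChar c
    · simp [goA, scanB, h, ih]
    · simp [goA, scanB, h, ih (t + 1)]

-- ===== VERDICT (by name: the statement is the Claim_ definition above) =====
theorem enumerate_seq_pos_spec : Claim_equal_enumerate_seq_pos := by
  intro s _
  unfold Spec_enumerate_seq_pos enumerate_seq_pos enumerate_seq_pos_alt
  simp only [foldA_gen, foldB_gen, List.nil_append]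
  have h := zip_scan_eq_goA s.toList 0
  norm_num at h
  exact h.symm
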